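-- pv_equiv track=rewrite | github.com/MelvinBerkoh/CS100 | Homework/HW10_MelvinBerkoh.py | sharedOneLetter
-- ===== SOURCE A (Python) =====
-- def sharedOneLetter(wordList):
--     '''
--     The function takes one parameter, wordList – a list of words. Create and return a dictionary in which each word in
--     wordList is a key and the corresponding value is a list of all the words in wordList that share at least one letter with that word. There should be no duplicate words in any
--     value in the dictionary
--      '''
--     result = {}
--     # loop through word list
--     for word in wordList:
--         # check to see if the word is not already in the dictionary
--         if word not in result:
--             # I am initial creating a key with the current word that we are looking at, the value is an empty array
--             result[word] = []
--             # now looping through each letter in the word one by one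
--             for letter in word:
--                 # now we are starting the loop for the words to matching by looping through the same array again
--                 for otherWord in wordList:
--                     # if the letter is present in the other words variable or in the words list and the word is not already a value
--                     if (letter in otherWord) and (otherWord not in result[word]):
--                         # append it to the empty array as the value
--                         result[word].append(otherWord)
--
--     return result
-- ===== SOURCE B (Python) =====
-- def sharedOneLetter(wordList):
--     # inverted index: letter -> words containing it, in wordList order
--     index = {}
--     for w in wordList:
--         for c in set(w):
--             index.setdefault(c, []).append(w)
--     result = {}
--     for word in wordList:
--         if word not in result:
--             seen = set()
--             vals = []
--             for c in word:
--                 for other in index.get(c, []):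
--                     if other not in seen:
--                         seen.add(other)
--                         vals.append(other)
--             result[word] = vals
--     return result
-- ===== Notes on version B (the rewrite author's own statement) =====
-- stated objective: faster
-- what changed: B builds a letter->words inverted index once and dedups each word's match list with a seen set, replacing A's per-word rescan of the whole word list per letter with its O(k) list-membership dedup.
import Mathlib
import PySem

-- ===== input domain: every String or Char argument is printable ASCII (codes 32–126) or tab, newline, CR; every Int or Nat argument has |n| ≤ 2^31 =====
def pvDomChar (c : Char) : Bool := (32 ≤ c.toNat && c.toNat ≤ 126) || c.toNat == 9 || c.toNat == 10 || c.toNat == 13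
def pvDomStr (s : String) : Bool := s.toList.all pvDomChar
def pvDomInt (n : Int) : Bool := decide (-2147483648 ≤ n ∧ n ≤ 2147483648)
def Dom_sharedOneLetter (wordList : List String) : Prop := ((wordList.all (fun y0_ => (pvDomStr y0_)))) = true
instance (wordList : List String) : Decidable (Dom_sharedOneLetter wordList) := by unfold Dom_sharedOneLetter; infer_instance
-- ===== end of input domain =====

-- B replaces A's per-word rescan of the whole list for every letter by a letter→words
-- inverted index built once plus a per-word seen set for dedup (objective: faster).

-- ===== PORT A =====
-- 'result[word] = []; … result[word].append(otherWord)' only ever touches the current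
-- key, so it is modelled as building the value list and inserting it once.
def sharedOneLetter (wordList : List String) : List (String × List String) :=
  (wordList.foldl (fun (result : PySem.Dict String (List String)) word =>
    if result.contains word then result
    else
      result.insert word
        (word.toList.foldl (fun value letter =>
          wordList.foldl (fun value otherWord =>
            if letter ∈ otherWord.toList ∧ otherWord ∉ value then value ++ [otherWord]
            else value) value) [])) PySem.Dict.empty).items

-- ===== PORT B =====
def sharedOneLetter_alt (wordList : List String) : List (String × List String) :=
  let index : PySem.Dict Char (List String) :=
    wordList.foldl (fun idx w =>
      (PySem.Set.ofList w.toList).foldl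
        (fun idx c => idx.modify c [] (· ++ [w])) idx) PySem.Dict.empty
  (wordList.foldl (fun (result : PySem.Dict String (List String)) word =>
    if result.contains word then result
    else
      let p := word.toList.foldl (fun (p : PySem.Set String × List String) c =>
        (index.getD c []).foldl (fun p other =>
          if other ∈ p.1 then p
          else (PySem.Set.add p.1 other, p.2 ++ [other])) p)
        (PySem.Set.empty, [])
      result.insert word p.2) PySem.Dict.empty).items

-- ===== PRECONDITION & SPEC =====
def Spec_sharedOneLetter (wordList : List String) (out : List (String × List String)) : Prop := out = sharedOneLetter_alt wordList
instance (wordList : List String) (out : List (String × List String)) : Decidable (Spec_sharedOneLetter wordList out) := by unfold Spec_sharedOneLetter; infer_instance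

-- ===== CLAIM (what is proved, stated in full; the proofs are below) =====
def Claim_equal_sharedOneLetter : Prop := ∀ (wordList : List String), Dom_sharedOneLetter wordList → Spec_sharedOneLetter wordList (sharedOneLetter wordList)

-- ===== LEMMAS AND PROOFS =====

-- updating the index under each letter of a duplicate-free letter list
theorem pv_index_inner (L : List Char) (hnd : L.Nodup) (idx : PySem.Dict Char (List String))
    (w : String) (c : Char) :
    ((L.foldl (fun idx c' => idx.modify c' [] (· ++ [w])) idx).getD c []) =
      if c ∈ L then idx.getD c [] ++ [w] else idx.getD c [] := by
  induction L generalizing idx with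
  | nil => simp
  | cons a L ih =>
    simp only [List.nodup_cons] at hnd
    simp only [List.foldl_cons, ih hnd.2, List.mem_cons, PySem.Dict.getD_modify]
    by_cases hca : c = a
    · subst hca
      simp [hnd.1]
    · simp [hca]

-- the built index lists, per letter, exactly the words containing it, in list order
theorem pv_index_char (wordList : List String) (c : Char) :
    ((wordList.foldl (fun idx w =>
      (PySem.Set.ofList w.toList).foldl
        (fun idx c => idx.modify c [] (· ++ [w])) idx) PySem.Dict.empty).getD c []) =
      wordList.filter (fun w => decide (c ∈ w.toList)) := by
  induction wordList using List.reverseRecOn with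
  | nil => simp
  | append_singleton ws w ih =>
    rw [List.foldl_append, List.foldl_cons, List.foldl_nil,
      pv_index_inner _ (PySem.Set.nodup_ofList _) _ w c, List.filter_append, ih]
    simp only [PySem.Set.mem_ofList]
    by_cases h : c ∈ w.toList
    · simp [h]
    · simp [h]

-- A's inner scan over the whole list = a dedup fold over the letter's matching words
theorem pv_A_inner_filter (ws : List String) (letter : Char) (value : List String) :
    ws.foldl (fun value otherWord =>
        if letter ∈ otherWord.toList ∧ otherWord ∉ value then value ++ [otherWord]
        else value) value =
      (ws.filter (fun w => decide (letter ∈ w.toList))).foldl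
        (fun value otherWord => if otherWord ∉ value then value ++ [otherWord] else value)
        value := by
  induction ws generalizing value with
  | nil => rfl
  | cons a ws ih =>
    simp only [List.foldl_cons, List.filter_cons]
    by_cases h : letter ∈ a.toList
    · simp only [h, true_and, decide_true, if_true, List.foldl_cons]
      exact ih _
    · simp only [h, false_and, if_false, decide_false]
      exact ih value

-- B's seen-set dedup fold over one letter's words: invariant + value
theorem pv_B_seen (L : List String) (s : PySem.Set String) (v : List String)
    (h : ∀ x, x ∈ s ↔ x ∈ v) :
    (∀ x, x ∈ (L.foldl (fun p other =>
        if other ∈ p.1 then p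
        else (PySem.Set.add p.1 other, p.2 ++ [other])) (s, v)).1 ↔
        x ∈ (L.foldl (fun p other =>
        if other ∈ p.1 then p
        else (PySem.Set.add p.1 other, p.2 ++ [other])) (s, v)).2) ∧
      (L.foldl (fun p other =>
        if other ∈ p.1 then p
        else (PySem.Set.add p.1 other, p.2 ++ [other])) (s, v)).2 =
      L.foldl (fun value otherWord =>
        if otherWord ∉ value then value ++ [otherWord] else value) v := by
  induction L generalizing s v with
  | nil => exact ⟨h, rfl⟩
  | cons a L ih =>
    simp only [List.foldl_cons]
    by_cases ha : a ∈ s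
    · have hav : a ∈ v := (h a).1 ha
      rw [if_pos ha, if_neg (not_not_intro hav)]
      exact ih s v h
    · have hav : a ∉ v := fun hv => ha ((h a).2 hv)
      rw [if_neg ha, if_pos hav]
      exact ih _ _ (fun x => by simp [PySem.Set.mem_add, h x, or_comm])

-- lift pv_B_seen through the letter loop (g c = the index's list for letter c)
theorem pv_B_letters (letters : List Char) (g : Char → List String)
    (s : PySem.Set String) (v : List String) (h : ∀ x, x ∈ s ↔ x ∈ v) :
    (∀ x, x ∈ (letters.foldl (fun (p : PySem.Set String × List String) c =>
        (g c).foldl (fun p other =>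
          if other ∈ p.1 then p
          else (PySem.Set.add p.1 other, p.2 ++ [other])) p) (s, v)).1 ↔
        x ∈ (letters.foldl (fun (p : PySem.Set String × List String) c =>
        (g c).foldl (fun p other =>
          if other ∈ p.1 then p
          else (PySem.Set.add p.1 other, p.2 ++ [other])) p) (s, v)).2) ∧
      (letters.foldl (fun (p : PySem.Set String × List String) c =>
        (g c).foldl (fun p other =>
          if other ∈ p.1 then p
          else (PySem.Set.add p.1 other, p.2 ++ [other])) p) (s, v)).2 =
      letters.foldl (fun value c =>
        (g c).foldl (fun value otherWord =>
          if otherWord ∉ value then value ++ [otherWord] else value) value) v := by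
  induction letters generalizing s v with
  | nil => exact ⟨h, rfl⟩
  | cons c letters ih =>
    simp only [List.foldl_cons]
    obtain ⟨h1, h2⟩ := pv_B_seen (g c) s v h
    obtain ⟨ih1, ih2⟩ := ih _ _ h1
    exact ⟨ih1, by rw [ih2, h2]⟩

-- per-word values agree
theorem pv_value_eq (wordList : List String) (word : String) :
    (word.toList.foldl (fun (p : PySem.Set String × List String) c =>
      (((wordList.foldl (fun idx w =>
        (PySem.Set.ofList w.toList).foldl
          (fun idx c => idx.modify c [] (· ++ [w])) idx) PySem.Dict.empty)).getD c []).foldl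
        (fun p other =>
          if other ∈ p.1 then p
          else (PySem.Set.add p.1 other, p.2 ++ [other])) p)
      (PySem.Set.empty, [])).2 =
    word.toList.foldl (fun value letter =>
      wordList.foldl (fun value otherWord =>
        if letter ∈ otherWord.toList ∧ otherWord ∉ value then value ++ [otherWord]
        else value) value) [] := by
  have h0 : ∀ x : String, x ∈ (PySem.Set.empty : PySem.Set String) ↔ x ∈ ([] : List String) := by
    simp [PySem.Set.empty]
  rw [(pv_B_letters word.toList _ PySem.Set.empty [] h0).2]
  simp only [pv_index_char, pv_A_inner_filter]

-- ===== VERDICT (by name: the statement is the Claim_ definition above) =====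
theorem sharedOneLetter_spec : Claim_equal_sharedOneLetter := by
  intro wordList _
  show sharedOneLetter wordList = sharedOneLetter_alt wordList
  unfold sharedOneLetter sharedOneLetter_alt
  apply congrArg PySem.Dict.items
  apply congrArg (fun f => List.foldl f PySem.Dict.empty wordList)
  funext result word
  by_cases h : result.contains word
  · simp [h]
  · simp only [h, Bool.false_eq_true, if_false]
    rw [pv_value_eq wordList word]
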